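-- pv_equiv track=rewrite | github.com/CHINAJR/algorithm1 | mostEOR.py | mostEOR
-- ===== SOURCE A (Python) =====
-- def mostEOR(arr):
-- 	'''异或最长子数组 '''
-- 	ans = 0
-- 	xor = 0
-- 	most = [0 for i in range(len(arr))]
-- 	maps = {}
-- 	maps[0] = -1
-- 	for i in range(len(arr)):
-- 		xor = xor^arr[i]
-- 		if maps.get(xor) != None:
-- 			pre = maps.get(xor)
-- 			if pre == -1:
-- 				most[i] = 1
-- 			else:
-- 				most[i] = most[pre]+1
-- 		if i > 0:
-- 			most[i] = max(most[i-1],most[i])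
-- 		maps[xor] = i
-- 		ans = max(ans,most[i])
-- 	return ans
-- ===== SOURCE B (Python) =====
-- def mostEOR(arr):
--     '''Greedy: cut as soon as a XOR-zero subarray ends; count the cuts.'''
--     cnt = 0
--     pre = 0
--     seen = {0}
--     for x in arr:
--         pre ^= x
--         if pre in seen:
--             cnt += 1
--             pre = 0
--             seen = {0}
--         else:
--             seen.add(pre)
--     return cnt
-- ===== Notes on version B (the rewrite author's own statement) =====
-- stated objective: alternative
-- what changed: B replaces A's dynamic programming (dp array most[] plus a never-reset map from prefix-xor to last index, taking maxima of dp values) by a greedy algorithm: it keeps only a SET of prefix-xors seen since the last cut, and whenever the current prefix-xor repeats it counts one subarray and resets the set and the running xor to the initial state; correct because cutting at the earliest possible end of a xor-zero subarray is optimal.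
import Mathlib
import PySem

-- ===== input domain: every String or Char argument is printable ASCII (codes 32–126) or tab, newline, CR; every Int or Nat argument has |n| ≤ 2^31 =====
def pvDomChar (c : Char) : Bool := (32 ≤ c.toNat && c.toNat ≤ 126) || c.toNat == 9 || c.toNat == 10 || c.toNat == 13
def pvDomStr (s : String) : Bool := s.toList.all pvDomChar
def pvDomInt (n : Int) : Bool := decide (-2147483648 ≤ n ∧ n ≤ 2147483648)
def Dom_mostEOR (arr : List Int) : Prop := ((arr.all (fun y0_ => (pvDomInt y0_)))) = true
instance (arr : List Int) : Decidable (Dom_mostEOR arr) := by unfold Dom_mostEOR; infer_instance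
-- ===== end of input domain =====

-- B replaces A's dp (most[] array + index-valued map) by the greedy cut-earliest
-- scheme with a resetting set of prefix-xors; objective: alternative algorithm.

-- ===== PORT A =====
-- one iteration of A's `for i in range(len(arr))` loop; state = (ans, xor, most, maps)
-- arr[i] and most[...] are always accessed in range by A, so pyGetD's default is never used
def mostEORStepA (arr : List Int) (st : Int × Int × List Int × PySem.Dict Int Int)
    (i : Int) : Int × Int × List Int × PySem.Dict Int Int :=
  let ans := st.1; let xor := st.2.1; let most := st.2.2.1; let maps := st.2.2.2
  let xor := PySem.Int.bxor xor (PySem.List.pyGetD arr i 0)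
  let most :=
    match maps.get? xor with
    | some pre =>
        if pre = -1 then most.set i.toNat 1
        else most.set i.toNat (PySem.List.pyGetD most pre 0 + 1)
    | none => most
  let most :=
    if i > 0 then
      most.set i.toNat (max (PySem.List.pyGetD most (i - 1) 0) (PySem.List.pyGetD most i 0))
    else most
  let maps := maps.insert xor i
  let ans := max ans (PySem.List.pyGetD most i 0)
  (ans, xor, most, maps)

def mostEOR (arr : List Int) : Int :=
  let most : List Int := (PySem.List.pyRange 0 (PySem.List.len arr)).map (fun _ => 0)
  let maps : PySem.Dict Int Int := (PySem.Dict.empty).insert 0 (-1)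
  ((PySem.List.pyRange 0 (PySem.List.len arr)).foldl (mostEORStepA arr)
    (0, 0, most, maps)).1

-- ===== PORT B =====
-- one iteration of B's `for x in arr` loop; state = (cnt, pre, seen)
def mostEORStepB (st : Int × Int × PySem.Set Int) (x : Int) : Int × Int × PySem.Set Int :=
  let cnt := st.1
  let pre := PySem.Int.bxor st.2.1 x
  let seen := st.2.2
  if PySem.Set.contains seen pre then (cnt + 1, 0, PySem.Set.ofList [0])
  else (cnt, pre, PySem.Set.add seen pre)

def mostEOR_alt (arr : List Int) : Int :=
  (arr.foldl mostEORStepB (0, 0, PySem.Set.ofList [0])).1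

-- ===== PRECONDITION & SPEC =====
def Spec_mostEOR (arr : List Int) (out : Int) : Prop := out = mostEOR_alt arr
instance (arr : List Int) (out : Int) : Decidable (Spec_mostEOR arr out) := by unfold Spec_mostEOR; infer_instance

-- ===== CLAIM (what is proved, stated in full; the proofs are below) =====
def Claim_equal_mostEOR : Prop := ∀ (arr : List Int), Dom_mostEOR arr → Spec_mostEOR arr (mostEOR arr)

-- ===== LEMMAS AND PROOFS =====

-- ---- xor algebra for PySem.Int.bxor ----
theorem pvBxorEqXor (a b : Int) : PySem.Int.bxor a b = Int.xor a b := by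
  rcases a with m | m <;> rcases b with n | n <;>
    simp [PySem.Int.bxor, Int.xor, Int.negSucc_eq] <;> omega

theorem pvXorAssoc (a b c : Int) : Int.xor (Int.xor a b) c = Int.xor a (Int.xor b c) := by
  rcases a with m | m <;> rcases b with n | n <;> rcases c with k | k <;>
    simp [Int.xor, Nat.xor_assoc]

theorem pvBxorAssoc (a b c : Int) :
    PySem.Int.bxor (PySem.Int.bxor a b) c = PySem.Int.bxor a (PySem.Int.bxor b c) := by
  simp [pvBxorEqXor, pvXorAssoc]

theorem pvBxorRightComm (a b c : Int) :
    PySem.Int.bxor (PySem.Int.bxor a b) c = PySem.Int.bxor (PySem.Int.bxor a c) b := by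
  rw [pvBxorAssoc, pvBxorAssoc, PySem.Int.bxor_comm b c]

theorem pvBxorCancel (a b : Int) : PySem.Int.bxor (PySem.Int.bxor a b) b = a := by
  rw [pvBxorAssoc, PySem.Int.bxor_self, PySem.Int.bxor_zero]

theorem pvBxorEqZero (a b : Int) : PySem.Int.bxor a b = 0 ↔ a = b := by
  constructor
  · intro h
    have h2 : PySem.Int.bxor (PySem.Int.bxor a b) b = PySem.Int.bxor 0 b := by rw [h]
    rw [pvBxorCancel, PySem.Int.bxor_comm 0 b, PySem.Int.bxor_zero] at h2
    exact h2
  · rintro rfl; exact PySem.Int.bxor_self a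

theorem pvBxorLeftInj (a b c : Int) :
    PySem.Int.bxor a c = PySem.Int.bxor b c ↔ a = b := by
  constructor
  · intro h
    have := congrArg (fun t => PySem.Int.bxor t c) h
    simpa [pvBxorCancel] using this
  · rintro rfl; rfl

-- ---- STAGE 1: A equals the value-carrying dp fold pvDpStep (proof-only helper) ----
-- proof-only intermediate: the dp of A with values stored in the map instead of indices
def pvDpStep (st : Int × Int × Int × PySem.Dict Int Int) (x : Int) :
    Int × Int × Int × PySem.Dict Int Int :=
  let ans := st.1; let xor := st.2.1; let prev := st.2.2.1; let last := st.2.2.2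
  let xor := PySem.Int.bxor xor x
  let cur := match last.get? xor with | some v => v + 1 | none => 0
  let cur := max cur prev
  (max ans cur, xor, cur, last.insert xor cur)

def pvDp (arr : List Int) : Int :=
  (arr.foldl pvDpStep (0, 0, 0, (PySem.Dict.empty).insert 0 0)).1

-- relation between A's map (prefix-xor -> index, -1 sentinel) plus dp array and
-- the dp map (prefix-xor -> dp value), after k elements have been processed
def InvMap (k : Nat) (most : List Int) (maps last : PySem.Dict Int Int) : Prop :=
  ∀ v : Int,
    (maps.get? v = none ∧ last.get? v = none) ∨
    ∃ j w, maps.get? v = some j ∧ last.get? v = some w ∧ 0 ≤ w ∧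
      ((j = -1 ∧ w = 0) ∨ (0 ≤ j ∧ j.toNat < k ∧ most.getD j.toNat 0 = w))

lemma getD_set_self (xs : List Int) (k : Nat) (v : Int) (h : k < xs.length) :
    (xs.set k v).getD k 0 = v := by
  simp [List.getD, List.getElem?_set_self h]

lemma getD_set_ne (xs : List Int) {k j : Nat} (v : Int) (h : k ≠ j) :
    (xs.set k v).getD j 0 = xs.getD j 0 := by
  simp [List.getD, List.getElem?_set_ne h]

lemma getD_all_zero {xs : List Int} (h : ∀ y ∈ xs, y = 0) (j : Nat) : xs.getD j 0 = 0 := by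
  unfold List.getD
  cases hj : xs[j]? with
  | none => rfl
  | some y => simpa using h y (List.mem_of_getElem? hj)

lemma getD_append_self (pref : List Int) (x : Int) (rs : List Int) :
    (pref ++ x :: rs).getD pref.length 0 = x := by
  simp [List.getD]

-- after one step of each loop, the invariant re-establishes itself with pref ++ [x]
lemma mostEOR_step_cont (x : Int) (rs : List Int)
    (ih : ∀ (pref : List Int) (ans xor prev : Int) (most : List Int)
      (maps last : PySem.Dict Int Int),
      most.length = pref.length + rs.length →
      prev = (if pref.length = 0 then 0 else most.getD (pref.length - 1) 0) →
      0 ≤ prev →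
      (∀ j : Nat, pref.length ≤ j → most.getD j 0 = 0) →
      InvMap pref.length most maps last →
      ((PySem.List.pyRange (pref.length : Int) ((pref.length : Int) + rs.length)).foldl
          (mostEORStepA (pref ++ rs)) (ans, xor, most, maps)).1
        = (rs.foldl pvDpStep (ans, xor, prev, last)).1)
    (pref : List Int) (ans xor cur : Int) (most most₂ : List Int)
    (maps last : PySem.Dict Int Int)
    (hlen : most.length = pref.length + rs.length + 1)
    (hlen₂ : most₂.length = most.length)
    (hcur : most₂.getD pref.length 0 = cur)
    (hcurnn : 0 ≤ cur)
    (hlow : ∀ j : Nat, j < pref.length → most₂.getD j 0 = most.getD j 0)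
    (hhigh : ∀ j : Nat, pref.length + 1 ≤ j → most₂.getD j 0 = 0)
    (hinv : InvMap pref.length most maps last) :
    ((PySem.List.pyRange ((pref.length : Int) + 1) ((pref.length : Int) + ((rs.length : Int) + 1))).foldl
        (mostEORStepA (pref ++ x :: rs)) (ans, xor, most₂, maps.insert xor (pref.length : Int))).1
      = (rs.foldl pvDpStep (ans, xor, cur, last.insert xor cur)).1 := by
  have harr : pref ++ x :: rs = (pref ++ [x]) ++ rs := by simp
  have hrange : PySem.List.pyRange ((pref.length : Int) + 1) ((pref.length : Int) + ((rs.length : Int) + 1))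
      = PySem.List.pyRange (((pref ++ [x]).length : Int)) (((pref ++ [x]).length : Int) + (rs.length : Int)) := by
    have h1 : ((pref ++ [x]).length : Int) = (pref.length : Int) + 1 := by simp
    rw [h1]; ring_nf
  rw [harr, hrange]
  apply ih
  · simp only [hlen₂, hlen, List.length_append, List.length_cons, List.length_nil]
    omega
  · have : (pref ++ [x]).length = pref.length + 1 := by simp
    rw [this]
    simpa using hcur.symm
  · exact hcurnn
  · intro j hj
    refine hhigh j ?_
    simpa using hj
  · intro v
    by_cases hv : v = xor
    · subst hv
      right
      refine ⟨(pref.length : Int), cur, PySem.Dict.get?_insert_self _ _ _,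
        PySem.Dict.get?_insert_self _ _ _, hcurnn, Or.inr ⟨by positivity, ?_, ?_⟩⟩
      · simp only [Int.toNat_natCast, List.length_append, List.length_cons, List.length_nil]
        omega
      · simpa using hcur
    · rw [PySem.Dict.get?_insert_of_ne _ _ hv, PySem.Dict.get?_insert_of_ne _ _ hv]
      rcases hinv v with hnone | ⟨j, w, hj, hw, hwnn, hrel⟩
      · exact Or.inl hnone
      · refine Or.inr ⟨j, w, hj, hw, hwnn, ?_⟩
        rcases hrel with h1 | ⟨hj0, hjk, hmj⟩
        · exact Or.inl h1
        · refine Or.inr ⟨hj0, ?_, ?_⟩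
          · simp only [List.length_append, List.length_cons, List.length_nil]
            omega
          · rw [hlow j.toNat hjk]; exact hmj

lemma mostEOR_loop_eq (rest : List Int) :
    ∀ (pref : List Int) (ans xor prev : Int) (most : List Int)
      (maps last : PySem.Dict Int Int),
      most.length = pref.length + rest.length →
      prev = (if pref.length = 0 then 0 else most.getD (pref.length - 1) 0) →
      0 ≤ prev →
      (∀ j : Nat, pref.length ≤ j → most.getD j 0 = 0) →
      InvMap pref.length most maps last →
      ((PySem.List.pyRange (pref.length : Int) ((pref.length : Int) + rest.length)).foldl
          (mostEORStepA (pref ++ rest)) (ans, xor, most, maps)).1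
        = (rest.foldl pvDpStep (ans, xor, prev, last)).1 := by
  induction rest with
  | nil =>
    intro pref ans xor prev most maps last _ _ _ _ _
    simp [PySem.List.pyRange]
  | cons x rs ih =>
    intro pref ans xor prev most maps last hlen hprev hprevnn hzero hinv
    have hklen : pref.length < most.length := by
      simp only [hlen, List.length_cons]; omega
    have hx : PySem.List.pyGetD (pref ++ x :: rs) (pref.length : Int) 0 = x := by
      rw [PySem.List.pyGetD_natCast]; exact getD_append_self pref x rs
    have egk : PySem.List.pyGetD most (pref.length : Int) 0 = 0 := by
      rw [PySem.List.pyGetD_natCast]; exact hzero _ le_rfl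
    have hcons : PySem.List.pyRange (pref.length : Int) ((pref.length : Int) + (((x :: rs).length : Nat) : Int))
        = (pref.length : Int) :: PySem.List.pyRange ((pref.length : Int) + 1) ((pref.length : Int) + (((x :: rs).length : Nat) : Int)) := by
      apply PySem.List.pyRange_one_cons
      have : (0:Int) < (((x :: rs).length : Nat) : Int) := by
        simp only [List.length_cons]; push_cast; omega
      omega
    rw [hcons]
    simp only [List.foldl_cons]
    have hcast : (((x :: rs).length : Nat) : Int) = (rs.length : Int) + 1 := by
      simp only [List.length_cons]; push_cast; ring
    rw [hcast]
    -- facts used when pref is nonempty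
    have hprevget : pref.length ≠ 0 →
        PySem.List.pyGetD most ((pref.length : Int) - 1) 0 = prev := by
      intro hk0
      have h1 : ((pref.length : Int) - 1) = ((pref.length - 1 : Nat) : Int) := by
        have := Nat.pos_of_ne_zero hk0; push_cast [Nat.cast_sub this]; ring
      rw [h1, PySem.List.pyGetD_natCast, hprev, if_neg hk0]
    rcases hinv (PySem.Int.bxor xor x) with ⟨hmA, hmB⟩ | ⟨j, w, hmA, hmB, hwnn, hrel⟩
    · -- prefix-xor not seen before: A leaves most[i] at 0 (then maxes), dp takes prev
      have hstepB : pvDpStep (ans, xor, prev, last) x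
          = (max ans prev, PySem.Int.bxor xor x, prev,
             last.insert (PySem.Int.bxor xor x) prev) := by
        simp only [pvDpStep, hmB]
        rw [max_eq_right hprevnn]
      rw [hstepB]
      by_cases hk0 : pref.length = 0
      · have hp0 : prev = 0 := by rw [hprev, if_pos hk0]
        have hstepA : mostEORStepA (pref ++ x :: rs) (ans, xor, most, maps) (pref.length : Int)
            = (max ans prev, PySem.Int.bxor xor x, most,
               maps.insert (PySem.Int.bxor xor x) (pref.length : Int)) := by
          simp only [mostEORStepA, hx, hmA]
          rw [if_neg (by omega : ¬ ((pref.length : Int) > 0)), egk, hp0]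
        rw [hstepA]
        exact mostEOR_step_cont x rs ih pref (max ans prev) _ prev most most maps last
          (by omega) rfl
          (by rw [hzero pref.length le_rfl]; exact hp0.symm)
          hprevnn (fun j hj => rfl) (fun j hj => hzero j (by omega)) hinv
      · have hpos : ((pref.length : Int) > 0) := by
          have := Nat.pos_of_ne_zero hk0; omega
        have hstepA : mostEORStepA (pref ++ x :: rs) (ans, xor, most, maps) (pref.length : Int)
            = (max ans prev, PySem.Int.bxor xor x, most.set pref.length prev,
               maps.insert (PySem.Int.bxor xor x) (pref.length : Int)) := by
          simp only [mostEORStepA, hx, hmA]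
          rw [if_pos hpos, egk, hprevget hk0, max_eq_left hprevnn]
          simp only [Int.toNat_natCast, PySem.List.pyGetD_natCast,
            getD_set_self most _ _ hklen]
        rw [hstepA]
        exact mostEOR_step_cont x rs ih pref (max ans prev) _ prev most _ maps last
          (by omega) (by simp) (getD_set_self most _ _ hklen) hprevnn
          (fun j hj => getD_set_ne most _ (by omega))
          (fun j hj => by rw [getD_set_ne most _ (by omega)]; exact hzero j (by omega)) hinv
    · rcases hrel with ⟨hj1, hw0⟩ | ⟨hj0, hjk, hmj⟩
      · -- stored index is the -1 sentinel: A writes 1, the dp reads last[xor] = 0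
        subst hj1; subst hw0
        have hstepB : pvDpStep (ans, xor, prev, last) x
            = (max ans (max 1 prev), PySem.Int.bxor xor x, max 1 prev,
               last.insert (PySem.Int.bxor xor x) (max 1 prev)) := by
          simp only [pvDpStep, hmB]; norm_num
        rw [hstepB]
        have hcurnn : (0:Int) ≤ max 1 prev :=
          le_trans zero_le_one (le_max_left _ _)
        have hstepA : mostEORStepA (pref ++ x :: rs) (ans, xor, most, maps) (pref.length : Int)
            = (max ans (max 1 prev), PySem.Int.bxor xor x,
               most.set pref.length (max 1 prev),
               maps.insert (PySem.Int.bxor xor x) (pref.length : Int)) := by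
          simp only [mostEORStepA, hx, hmA, reduceIte, Int.toNat_natCast]
          by_cases hk0 : pref.length = 0
          · have hp0 : prev = 0 := by rw [hprev, if_pos hk0]
            rw [if_neg (by omega : ¬ ((pref.length : Int) > 0)), hp0,
              PySem.List.pyGetD_natCast, getD_set_self most _ _ hklen]
            norm_num
          · have hpos : ((pref.length : Int) > 0) := by
              have := Nat.pos_of_ne_zero hk0; omega
            rw [if_pos hpos]
            have e1 : PySem.List.pyGetD (most.set pref.length 1) ((pref.length : Int) - 1) 0
                = prev := by
              have h1 : ((pref.length : Int) - 1) = ((pref.length - 1 : Nat) : Int) := by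
                have := Nat.pos_of_ne_zero hk0; push_cast [Nat.cast_sub this]; ring
              rw [h1, PySem.List.pyGetD_natCast,
                getD_set_ne most _ (by omega), hprev, if_neg hk0]
            have e2 : PySem.List.pyGetD (most.set pref.length 1) ((pref.length : Int)) 0
                = 1 := by
              rw [PySem.List.pyGetD_natCast, getD_set_self most _ _ hklen]
            rw [e1, e2, List.set_set, max_comm prev 1,
              PySem.List.pyGetD_natCast, getD_set_self most _ _ hklen]
        rw [hstepA]
        exact mostEOR_step_cont x rs ih pref _ _ (max 1 prev) most _ maps last
          (by omega) (by simp) (getD_set_self most _ _ hklen) hcurnn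
          (fun j hj => getD_set_ne most _ (by omega))
          (fun j hj => by rw [getD_set_ne most _ (by omega)]; exact hzero j (by omega)) hinv
      · -- stored index is a real position: A reads most[j]+1, the dp reads last[xor]+1
        have hkpos : 0 < pref.length := by omega
        have hk0 : pref.length ≠ 0 := by omega
        have hjne : j ≠ -1 := by omega
        have hpos : ((pref.length : Int) > 0) := by omega
        have hcurnn : (0:Int) ≤ max (w + 1) prev :=
          le_trans (by omega) (le_max_left _ _)
        have hstepB : pvDpStep (ans, xor, prev, last) x
            = (max ans (max (w + 1) prev), PySem.Int.bxor xor x, max (w + 1) prev,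
               last.insert (PySem.Int.bxor xor x) (max (w + 1) prev)) := by
          simp only [pvDpStep, hmB]
        rw [hstepB]
        have hstepA : mostEORStepA (pref ++ x :: rs) (ans, xor, most, maps) (pref.length : Int)
            = (max ans (max (w + 1) prev), PySem.Int.bxor xor x,
               most.set pref.length (max (w + 1) prev),
               maps.insert (PySem.Int.bxor xor x) (pref.length : Int)) := by
          simp only [mostEORStepA, hx, hmA, if_neg hjne, Int.toNat_natCast]
          rw [if_pos hpos]
          have e0 : PySem.List.pyGetD most j 0 = w := by
            rw [PySem.List.pyGetD_of_nonneg most 0 hj0, hmj]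
          have e1 : PySem.List.pyGetD (most.set pref.length (w + 1)) ((pref.length : Int) - 1) 0
              = prev := by
            have h1 : ((pref.length : Int) - 1) = ((pref.length - 1 : Nat) : Int) := by
              push_cast [Nat.cast_sub hkpos]; ring
            rw [h1, PySem.List.pyGetD_natCast,
              getD_set_ne most _ (by omega), hprev, if_neg hk0]
          have e2 : PySem.List.pyGetD (most.set pref.length (w + 1)) ((pref.length : Int)) 0
              = w + 1 := by
            rw [PySem.List.pyGetD_natCast, getD_set_self most _ _ hklen]
          rw [e0, e1, e2, List.set_set, max_comm prev (w + 1),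
            PySem.List.pyGetD_natCast, getD_set_self most _ _ hklen]
        rw [hstepA]
        exact mostEOR_step_cont x rs ih pref _ _ (max (w + 1) prev) most _ maps last
          (by omega) (by simp) (getD_set_self most _ _ hklen) hcurnn
          (fun j hj => getD_set_ne most _ (by omega))
          (fun j hj => by rw [getD_set_ne most _ (by omega)]; exact hzero j (by omega)) hinv

lemma mostEOR_eq_dp (arr : List Int) : mostEOR arr = pvDp arr := by
  unfold mostEOR pvDp
  have hzeros : ∀ y ∈ (PySem.List.pyRange 0 (PySem.List.len arr)).map (fun _ => (0:Int)), y = 0 := by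
    simp
  have hinv0 : InvMap 0 ((PySem.List.pyRange 0 (PySem.List.len arr)).map (fun _ => (0:Int)))
      ((PySem.Dict.empty).insert 0 (-1)) ((PySem.Dict.empty).insert 0 0) := by
    intro v
    by_cases hv : v = 0
    · subst hv
      exact Or.inr ⟨-1, 0, PySem.Dict.get?_insert_self _ _ _,
        PySem.Dict.get?_insert_self _ _ _, le_rfl, Or.inl ⟨rfl, rfl⟩⟩
    · rw [PySem.Dict.get?_insert_of_ne _ _ hv, PySem.Dict.get?_insert_of_ne _ _ hv]
      exact Or.inl ⟨PySem.Dict.get?_empty v, PySem.Dict.get?_empty v⟩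
  have h := mostEOR_loop_eq arr [] 0 0 0
    ((PySem.List.pyRange 0 (PySem.List.len arr)).map (fun _ => (0:Int)))
    ((PySem.Dict.empty).insert 0 (-1)) ((PySem.Dict.empty).insert 0 0)
    (by simp) (by simp) le_rfl
    (fun j _ => getD_all_zero hzeros j) hinv0
  simpa [PySem.List.len_eq] using h

-- ---- STAGE 2: the dp fold equals B's greedy fold ----
-- dp value at the last occurrence of a prefix-xor equals the current count exactly
-- when that occurrence lies at or after the last greedy cut, i.e. when the relative
-- prefix-xor (v xor c, c = absolute prefix at the cut) is in the greedy set
lemma dp_eq_greedy (rest : List Int) :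
    ∀ (ans xor prev : Int) (last : PySem.Dict Int Int)
      (cnt pre : Int) (seen : PySem.Set Int) (c : Int),
      pre = PySem.Int.bxor xor c →
      ans = cnt → prev = cnt → 0 ≤ cnt →
      (∀ v : Int, (PySem.Int.bxor v c ∈ seen ↔ last.get? v = some cnt)) →
      (∀ v w : Int, last.get? v = some w → w ≤ cnt) →
      (rest.foldl pvDpStep (ans, xor, prev, last)).1
        = (rest.foldl mostEORStepB (cnt, pre, seen)).1 := by
  induction rest with
  | nil =>
    intro ans xor prev last cnt pre seen c _ hans _ _ _ _
    simpa using hans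
  | cons x rs ih =>
    intro ans xor prev last cnt pre seen c hpre hans hprev hcnt hmem hbound
    rw [hpre, hans, hprev]
    simp only [List.foldl_cons]
    have hrel : PySem.Int.bxor (PySem.Int.bxor xor c) x
        = PySem.Int.bxor (PySem.Int.bxor xor x) c := pvBxorRightComm xor c x
    by_cases hc : PySem.Int.bxor (PySem.Int.bxor xor x) c ∈ seen
    · -- greedy cuts; the dp map holds exactly cnt at the new prefix-xor
      have hget : last.get? (PySem.Int.bxor xor x) = some cnt := (hmem _).mp hc
      have hstepA : pvDpStep (cnt, xor, cnt, last) x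
          = (cnt + 1, PySem.Int.bxor xor x, cnt + 1,
             last.insert (PySem.Int.bxor xor x) (cnt + 1)) := by
        simp only [pvDpStep, hget]
        rw [max_eq_left (by omega : cnt ≤ cnt + 1), max_eq_right (by omega : cnt ≤ cnt + 1)]
      have hstepB : mostEORStepB (cnt, PySem.Int.bxor xor c, seen) x
          = (cnt + 1, 0, PySem.Set.ofList [0]) := by
        simp only [mostEORStepB, hrel]
        rw [if_pos ((PySem.Set.contains_iff _ _).mpr hc)]
      rw [hstepA, hstepB]
      apply ih _ _ _ _ _ _ _ (PySem.Int.bxor xor x)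
      · rw [PySem.Int.bxor_self]
      · rfl
      · rfl
      · omega
      · intro v
        by_cases hv : v = PySem.Int.bxor xor x
        · subst hv
          rw [PySem.Dict.get?_insert_self]
          simp [PySem.Set.ofList, PySem.Set.add, PySem.Int.bxor_self]
        · rw [PySem.Dict.get?_insert_of_ne _ _ hv]
          constructor
          · intro hin
            have : PySem.Int.bxor v (PySem.Int.bxor xor x) = 0 := by
              simpa [PySem.Set.ofList, PySem.Set.add] using hin
            exact absurd ((pvBxorEqZero _ _).mp this) hv
          · intro hg
            exact absurd (hbound _ _ hg) (by omega)
      · intro v w hg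
        by_cases hv : v = PySem.Int.bxor xor x
        · subst hv
          rw [PySem.Dict.get?_insert_self] at hg
          cases hg
          omega
        · rw [PySem.Dict.get?_insert_of_ne _ _ hv] at hg
          exact le_trans (hbound _ _ hg) (by omega)
    · -- no cut: the dp's candidate is at most cnt, so cur = cnt on both sides
      have hget : last.get? (PySem.Int.bxor xor x) ≠ some cnt :=
        fun h => hc ((hmem _).mpr h)
      have hcur : (match last.get? (PySem.Int.bxor xor x) with
          | some v => v + 1 | none => 0) ≤ cnt := by
        cases hg : last.get? (PySem.Int.bxor xor x) with
        | none => exact hcnt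
        | some w =>
          have h1 := hbound _ _ hg
          have h2 : w ≠ cnt := fun h => hget (h ▸ hg)
          show w + 1 ≤ cnt
          omega
      have hstepA : pvDpStep (cnt, xor, cnt, last) x
          = (cnt, PySem.Int.bxor xor x, cnt,
             last.insert (PySem.Int.bxor xor x) cnt) := by
        simp only [pvDpStep]
        rw [max_eq_right hcur, max_eq_left (le_refl cnt)]
      have hstepB : mostEORStepB (cnt, PySem.Int.bxor xor c, seen) x
          = (cnt, PySem.Int.bxor (PySem.Int.bxor xor x) c,
             PySem.Set.add seen (PySem.Int.bxor (PySem.Int.bxor xor x) c)) := by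
        simp only [mostEORStepB, hrel]
        rw [if_neg (by simpa [PySem.Set.contains_iff] using hc)]
      rw [hstepA, hstepB]
      apply ih _ _ _ _ _ _ _ c
      · rfl
      · rfl
      · rfl
      · exact hcnt
      · intro v
        rw [PySem.Set.mem_add]
        by_cases hv : v = PySem.Int.bxor xor x
        · subst hv
          rw [PySem.Dict.get?_insert_self]
          simp
        · rw [PySem.Dict.get?_insert_of_ne _ _ hv]
          have hne : PySem.Int.bxor v c ≠ PySem.Int.bxor (PySem.Int.bxor xor x) c :=
            fun h => hv ((pvBxorLeftInj _ _ _).mp h)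
          constructor
          · rintro (hin | heq)
            · exact (hmem v).mp hin
            · exact absurd heq hne
          · intro hg
            exact Or.inl ((hmem v).mpr hg)
      · intro v w hg
        by_cases hv : v = PySem.Int.bxor xor x
        · subst hv
          rw [PySem.Dict.get?_insert_self] at hg
          cases hg
          omega
        · rw [PySem.Dict.get?_insert_of_ne _ _ hv] at hg
          exact hbound _ _ hg

-- ===== VERDICT (by name: the statement is the Claim_ definition above) =====
theorem mostEOR_spec : Claim_equal_mostEOR := by
  intro arr _
  unfold Spec_mostEOR
  rw [mostEOR_eq_dp]
  unfold pvDp mostEOR_alt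
  apply dp_eq_greedy arr 0 0 0 _ 0 0 _ 0
  · rw [PySem.Int.bxor_self]
  · rfl
  · rfl
  · exact le_refl 0
  · intro v
    by_cases hv : v = 0
    · subst hv
      rw [PySem.Dict.get?_insert_self]
      simp [PySem.Set.ofList, PySem.Set.add]
    · rw [PySem.Dict.get?_insert_of_ne _ _ hv, PySem.Dict.get?_empty]
      constructor
      · intro hin
        have : PySem.Int.bxor v 0 = 0 := by
          simpa [PySem.Set.ofList, PySem.Set.add] using hin
        rw [PySem.Int.bxor_zero] at this
        exact absurd this hv
      · intro h; cases h
  · intro v w hg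
    by_cases hv : v = 0
    · subst hv
      rw [PySem.Dict.get?_insert_self] at hg
      cases hg; exact le_refl 0
    · rw [PySem.Dict.get?_insert_of_ne _ _ hv, PySem.Dict.get?_empty] at hg
      cases hg
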